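-- pv_equiv track=rewrite | github.com/choijunho-AIDeveloper/Basic-Algorithm | SolveProgrammers/Level1/문자열_나누기.py | solution
-- ===== SOURCE A (Python) =====
-- def solution(s):
--     from collections import deque
--     s = deque(list(s))
--     answer = 0
--     left, right = 0, 0
--     while s:
--         comp = s.popleft()
--         left += 1
--         while s and left > right:
--             temp = s.popleft()
--             if comp == temp:
--                 left += 1
--             else:
--                 right += 1
--         answer += 1
--     return answer
-- ===== SOURCE B (Python) =====
-- def solution(s):
--     answer = 0
--     same = diff = 0
--     comp = None
--     for c in s:
--         if same == diff:
--             comp = c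
--             answer += 1
--         if c == comp:
--             same += 1
--         else:
--             diff += 1
--     return answer
-- ===== Notes on version B (the rewrite author's own statement) =====
-- stated objective: simpler
-- what changed: Replaced the deque with destructive popleft and the nested while loops (one inner loop per segment) by one flat for-loop over the string with two never-reset counters, incrementing the answer exactly when the counters are equal; per-character work drops to a couple of comparisons with no deque operations.
import Mathlib
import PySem

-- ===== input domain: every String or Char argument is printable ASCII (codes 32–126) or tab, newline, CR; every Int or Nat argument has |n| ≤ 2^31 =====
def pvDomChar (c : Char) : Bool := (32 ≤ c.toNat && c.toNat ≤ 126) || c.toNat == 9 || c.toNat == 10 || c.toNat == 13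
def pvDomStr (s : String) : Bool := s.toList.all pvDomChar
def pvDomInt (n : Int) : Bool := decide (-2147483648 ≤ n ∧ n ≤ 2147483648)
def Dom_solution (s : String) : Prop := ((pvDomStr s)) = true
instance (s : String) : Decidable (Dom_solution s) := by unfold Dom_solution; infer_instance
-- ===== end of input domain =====

-- B replaces A's deque and nested while loops by one flat pass with two never-reset counters (objective: simpler).

-- ===== PORT A =====
-- inner 'while s and left > right' loop: returns the remaining deque and the updated counters
def innerA (s : List Char) (comp : Char) (left right : Int) : List Char × Int × Int :=
  match s with
  | [] => ([], left, right)
  | temp :: rest =>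
    if left > right then
      if comp == temp then innerA rest comp (left + 1) right
      else innerA rest comp left (right + 1)
    else (temp :: rest, left, right)

theorem innerA_len (s : List Char) : ∀ (comp : Char) (l r : Int),
    (innerA s comp l r).1.length ≤ s.length := by
  induction s with
  | nil => intro comp l r; simp [innerA]
  | cons t rest ih =>
    intro comp l r
    simp only [innerA]
    split_ifs with h1 h2
    · exact le_trans (ih comp (l + 1) r) (by simp)
    · exact le_trans (ih comp l (r + 1)) (by simp)
    · simp

-- outer 'while s' loop
def outerA (s : List Char) (left right answer : Int) : Int :=
  match s with
  | [] => answer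
  | comp :: rest =>
    match h : innerA rest comp (left + 1) right with
    | (s', l', r') => outerA s' l' r' (answer + 1)
termination_by s.length
decreasing_by
  have hlen := innerA_len rest comp (left + 1) right
  rw [h] at hlen
  simp only [List.length_cons] at *
  omega

def solution (s : String) : Int := outerA s.toList 0 0 0

-- ===== PORT B =====
-- flat for-loop over the characters, never resetting the counters
def loopB (s : List Char) (comp : Option Char) (same diff answer : Int) : Int :=
  match s with
  | [] => answer
  | c :: rest =>
    let (comp, answer) := if same == diff then (some c, answer + 1) else (comp, answer)
    if some c == comp then loopB rest comp (same + 1) diff answer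
    else loopB rest comp same (diff + 1) answer

def solution_alt (s : String) : Int := loopB s.toList none 0 0 0

-- ===== PRECONDITION & SPEC =====
def Spec_solution (s : String) (out : Int) : Prop := out = solution_alt s
instance (s : String) (out : Int) : Decidable (Spec_solution s out) := by unfold Spec_solution; infer_instance

-- ===== CLAIM (what is proved, stated in full; the proofs are below) =====
def Claim_equal_solution : Prop := ∀ (s : String), Dom_solution s → Spec_solution s (solution s)

-- ===== LEMMAS AND PROOFS =====
-- Invariant: inside a segment, A's (left - right) equals B's (same - diff); both loops make the
-- same comparison against the same segment head, so the outer continuation of A tracks loopB.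
theorem main_inv (s : List Char) : ∀ (comp : Char) (l r same diff ans : Int),
    l - r = same - diff → 0 ≤ l - r →
    (match innerA s comp l r with
     | (s', l', r') => outerA s' l' r' ans) = loopB s (some comp) same diff ans := by
  induction s with
  | nil =>
    intro comp l r same diff ans h1 h2
    simp [innerA, outerA, loopB]
  | cons t rest ih =>
    intro comp l r same diff ans h1 h2
    by_cases hlr : l > r
    · have hne : ¬ same = diff := by omega
      by_cases hct : comp = t
      · have := ih comp (l + 1) r (same + 1) diff ans (by omega) (by omega)
        simp only [innerA, loopB, if_pos hlr] at this ⊢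
        simpa [hne, hct] using this
      · have := ih comp l (r + 1) same (diff + 1) ans (by omega) (by omega)
        simp only [innerA, loopB, if_pos hlr] at this ⊢
        have hct' : ¬ t = comp := fun h => hct h.symm
        simpa [hne, hct, hct'] using this
    · have hl : l = r := by omega
      have hsame : same = diff := by omega
      simp only [innerA, if_neg hlr, loopB]
      rw [outerA]
      have := ih t (l + 1) r (same + 1) diff (ans + 1) (by omega) (by omega)
      simpa [hsame] using this

-- ===== VERDICT (by name: the statement is the Claim_ definition above) =====
theorem solution_spec : Claim_equal_solution := by
  unfold Claim_equal_solution
  intro s _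
  unfold Spec_solution solution solution_alt
  cases hs : s.toList with
  | nil => simp [outerA, loopB]
  | cons t rest =>
    rw [outerA]
    simp only [loopB]
    have := main_inv rest t 1 0 1 0 1 (by omega) (by omega)
    simpa using this
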